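-- pv_equiv track=rewrite | github.com/DariaMinina/leetcode_solve_problems | line_reflection.py | line_reflection
-- ===== SOURCE A (Python) =====
-- import math
--
-- def line_reflection(points):
--     minX = math.inf
--     maxX = -math.inf
--     seen = set()
--
--     for x, y in points:
--         minX = min(minX, x)
--         maxX = max(maxX, x)
--         seen.add((x, y))
--
--     sumX = maxX + minX
--
--     return all((sumX - x, y) in seen for x, y in points)
-- ===== SOURCE B (Python) =====
-- def line_reflection(points):
--     # Canonical-form check: sort the deduplicated point set and compare it,
--     # as a whole list, with the sorted list of its reflected points.
--     pts = sorted({(x, y) for x, y in points})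
--     if not pts:
--         return True
--     s = pts[0][0] + pts[-1][0]
--     return pts == sorted((s - x, y) for x, y in pts)
-- ===== Notes on version B (the rewrite author's own statement) =====
-- stated objective: alternative
-- what changed: B abandons A's per-point hash-membership test entirely: it sorts the deduplicated point set once, reads the axis from the two ends of the sorted list, and decides symmetry by comparing that whole list with the sorted list of its reflections (a canonical-form equality instead of n set lookups).
import Mathlib
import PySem

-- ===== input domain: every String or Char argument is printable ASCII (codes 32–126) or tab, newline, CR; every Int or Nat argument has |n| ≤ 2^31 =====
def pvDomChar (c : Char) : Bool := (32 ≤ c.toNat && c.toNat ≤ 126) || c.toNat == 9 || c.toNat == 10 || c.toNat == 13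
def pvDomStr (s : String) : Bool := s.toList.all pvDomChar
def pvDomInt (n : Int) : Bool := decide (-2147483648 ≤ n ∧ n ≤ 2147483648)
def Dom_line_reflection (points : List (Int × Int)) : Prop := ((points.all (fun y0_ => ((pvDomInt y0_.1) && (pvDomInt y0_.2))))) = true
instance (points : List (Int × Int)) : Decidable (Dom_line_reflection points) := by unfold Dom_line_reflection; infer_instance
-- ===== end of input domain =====

-- B replaces A's per-point hash-membership test by a canonical-form comparison: it sorts the
-- deduplicated point set once and compares it, as one list, with the sorted reflected list.

-- ===== PORT A =====
-- minX = math.inf / maxX = -math.inf are modelled as Option Int (none = not yet any point);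
-- when points is empty the trailing `all` is over an empty generator, hence True.
def line_reflection (points : List (Int × Int)) : Bool :=
  let st := points.foldl
    (fun (st : Option Int × Option Int × PySem.Set (Int × Int)) p =>
      (some (match st.1 with | none => p.1 | some m => min m p.1),
       some (match st.2.1 with | none => p.1 | some m => max m p.1),
       PySem.Set.add st.2.2 p))
    (none, none, PySem.Set.empty)
  match st.1, st.2.1 with
  | some mn, some mx =>
      let sumX := mx + mn
      points.all (fun p => PySem.Set.contains st.2.2 (sumX - p.1, p.2))
  | _, _ => true

-- ===== PORT B =====
-- sorted(...) on tuples is Python's lexicographic tuple order = PySem.List.sorted2 fst snd;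
-- pts[0] / pts[-1] are PySem.List.pyGetD 0 / (-1) (the default is unreachable: pts ≠ []).
def line_reflection_alt (points : List (Int × Int)) : Bool :=
  let pts := PySem.List.sorted2 (PySem.Set.ofList points) Prod.fst Prod.snd
  if pts = [] then true
  else
    let s := (PySem.List.pyGetD pts 0 (0, 0)).1 + (PySem.List.pyGetD pts (-1) (0, 0)).1
    pts == PySem.List.sorted2 (pts.map (fun q => (s - q.1, q.2))) Prod.fst Prod.snd

-- ===== PRECONDITION & SPEC =====
def Spec_line_reflection (points : List (Int × Int)) (out : Bool) : Prop := out = line_reflection_alt points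
instance (points : List (Int × Int)) (out : Bool) : Decidable (Spec_line_reflection points out) := by unfold Spec_line_reflection; infer_instance

-- ===== CLAIM (what is proved, stated in full; the proofs are below) =====
def Claim_equal_line_reflection : Prop := ∀ (points : List (Int × Int)), Dom_line_reflection points → Spec_line_reflection points (line_reflection points)

-- ===== LEMMAS AND PROOFS =====

-- Python's tuple comparison: sorted2 with fst/snd IS sorted with the lexicographic key.
theorem sorted2_eq_sorted_lex (xs : List (Int × Int)) :
    PySem.List.sorted2 xs Prod.fst Prod.snd
      = PySem.List.sorted xs (fun p => toLex p) := by
  unfold PySem.List.sorted2 PySem.List.sorted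
  simp only [Bool.false_eq_true, if_false]
  have h : (fun (a b : Int × Int) =>
      decide (a.1 < b.1) || (!decide (b.1 < a.1) && decide (a.2 < b.2)))
      = (fun (a b : Int × Int) => decide (toLex a < toLex b)) := by
    funext a b
    by_cases h1 : a.1 < b.1 <;> by_cases h2 : b.1 < a.1 <;> by_cases h3 : a.2 < b.2 <;>
      simp [h1, h2, h3, Prod.Lex.lt_iff] <;> omega
  rw [h]

-- A's running min over the fold, once started, is the plain foldl min over first components.
theorem optmin_fold (t : List (Int × Int)) : ∀ (a : Int),
    t.foldl (fun (mn : Option Int) q => some (match mn with | none => q.1 | some m => min m q.1)) (some a)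
      = some (t.foldl (fun m q => min m q.1) a) := by
  induction t with
  | nil => intro a; rfl
  | cons p t ih => intro a; simpa using ih (min a p.1)

theorem optmax_fold (t : List (Int × Int)) : ∀ (a : Int),
    t.foldl (fun (mx : Option Int) q => some (match mx with | none => q.1 | some m => max m q.1)) (some a)
      = some (t.foldl (fun m q => max m q.1) a) := by
  induction t with
  | nil => intro a; rfl
  | cons p t ih => intro a; simpa using ih (max a p.1)

-- characterisation of A (nonempty input): true iff every reflected point is present
theorem portA_char (p : Int × Int) (t : List (Int × Int)) :
    (line_reflection (p :: t) = true ↔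
      ∀ q ∈ p :: t,
        ((t.foldl (fun m r => max m r.1) p.1 + t.foldl (fun m r => min m r.1) p.1) - q.1, q.2) ∈ p :: t) := by
  unfold line_reflection
  rw [List.foldl_cons]
  rw [PySem.List.foldl_prod_mk
        (f := fun (mn : Option Int) q => some (match mn with | none => q.1 | some m => min m q.1))
        (g := fun (s : Option Int × PySem.Set (Int × Int)) q =>
          (some (match s.1 with | none => q.1 | some m => max m q.1), PySem.Set.add s.2 q))]
  rw [PySem.List.foldl_prod_mk
        (f := fun (mx : Option Int) q => some (match mx with | none => q.1 | some m => max m q.1))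
        (g := fun (s : PySem.Set (Int × Int)) q => PySem.Set.add s q)]
  simp only [optmin_fold, optmax_fold]
  have hseen : t.foldl (fun (s : PySem.Set (Int × Int)) q => PySem.Set.add s q)
      (PySem.Set.add PySem.Set.empty p) = PySem.Set.ofList (p :: t) := by
    rw [PySem.Set.ofList_eq_foldl]; rfl
  rw [hseen]
  simp [PySem.Set.mem_ofList, List.all_eq_true]

-- pts[0] and pts[-1] on a nonempty list
theorem pyGetD_zero_cons (x : Int × Int) (xs : List (Int × Int)) (d : Int × Int) :
    PySem.List.pyGetD (x :: xs) 0 d = x := by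
  simp [PySem.List.pyGetD, PySem.List.pyGet?, PySem.List.pyIdx?]

theorem pyGetD_neg_one (xs : List (Int × Int)) (h : xs ≠ []) (d : Int × Int) :
    PySem.List.pyGetD xs (-1) d = xs.getLast h := by
  have hlen : 0 < xs.length := List.length_pos_iff.mpr h
  simp only [PySem.List.pyGetD, PySem.List.pyGet?, PySem.List.pyIdx?]
  rw [if_neg (by omega), if_pos (by omega)]
  simp only [Option.bind_some]
  have ht : (-(-1 : Int)).toNat = 1 := rfl
  rw [ht, List.getLast_eq_getElem, List.getElem?_eq_getElem (by omega)]
  rfl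

-- characterisation of B (nonempty input), same right-hand side as portA_char
theorem portB_char (p : Int × Int) (t : List (Int × Int)) :
    (line_reflection_alt (p :: t) = true ↔
      ∀ q ∈ p :: t,
        ((t.foldl (fun m r => max m r.1) p.1 + t.foldl (fun m r => min m r.1) p.1) - q.1, q.2) ∈ p :: t) := by
  simp only [line_reflection_alt, sorted2_eq_sorted_lex]
  set key : Int × Int → Lex (Int × Int) := fun p => toLex p with hkey
  have hkinj : Function.Injective key := fun a b h => by
    simpa [hkey] using congrArg ofLex h
  set S : PySem.Set (Int × Int) := PySem.Set.ofList (p :: t) with hS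
  set pts := PySem.List.sorted S key with hpts
  have hperm : pts.Perm S := PySem.List.sorted_perm S key false
  have hmemS : ∀ x, x ∈ S ↔ x ∈ p :: t := fun x => PySem.Set.mem_ofList (p :: t) x
  have hmem : ∀ x, x ∈ pts ↔ x ∈ p :: t := fun x => (hperm.mem_iff).trans (hmemS x)
  have hnd : pts.Nodup := (hperm.nodup_iff).mpr (PySem.Set.nodup_ofList _)
  have hpw : List.Pairwise (fun a b => key a ≤ key b) pts := PySem.List.sorted_pairwise S key
  have hne : pts ≠ [] := by
    intro h0
    have : S = [] := (PySem.List.sorted_eq_nil_iff S key false).mp h0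
    have : p ∈ ([] : List (Int × Int)) := this ▸ (hmemS p).mpr (List.mem_cons_self)
    simp at this
  rw [if_neg hne]
  set mn := t.foldl (fun m r => min m r.1) p.1 with hmn
  set mx := t.foldl (fun m r => max m r.1) p.1 with hmx
  -- the x-extrema of points, via the foldl lemmas on the mapped list
  have hmn' : mn = (t.map Prod.fst).foldl min p.1 := by rw [hmn, List.foldl_map]
  have hmx' : mx = (t.map Prod.fst).foldl max p.1 := by rw [hmx, List.foldl_map]
  have hmn_le : ∀ q ∈ p :: t, mn ≤ q.1 := by
    intro q hq
    rcases List.mem_cons.mp hq with h | h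
    · subst h; rw [hmn']; exact (PySem.List.foldl_min_le _ _).1
    · rw [hmn']; exact (PySem.List.foldl_min_le _ _).2 q.1 (List.mem_map_of_mem h)
  have hle_mx : ∀ q ∈ p :: t, q.1 ≤ mx := by
    intro q hq
    rcases List.mem_cons.mp hq with h | h
    · subst h; rw [hmx']; exact (PySem.List.le_foldl_max _ _).1
    · rw [hmx']; exact (PySem.List.le_foldl_max _ _).2 q.1 (List.mem_map_of_mem h)
  have hmn_mem : ∃ q ∈ p :: t, q.1 = mn := by
    rw [hmn']
    rcases PySem.List.foldl_min_mem (t.map Prod.fst) p.1 with h | h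
    · exact ⟨p, List.mem_cons_self, h.symm⟩
    · obtain ⟨q, hq, hq1⟩ := List.mem_map.mp h
      exact ⟨q, List.mem_cons_of_mem _ hq, hq1⟩
  have hmx_mem : ∃ q ∈ p :: t, q.1 = mx := by
    rw [hmx']
    rcases PySem.List.foldl_max_mem (t.map Prod.fst) p.1 with h | h
    · exact ⟨p, List.mem_cons_self, h.symm⟩
    · obtain ⟨q, hq, hq1⟩ := List.mem_map.mp h
      exact ⟨q, List.mem_cons_of_mem _ hq, hq1⟩
  -- head of the sorted list has minimal x, last has maximal x
  obtain ⟨m, ts, hcons⟩ := List.exists_cons_of_ne_nil hne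
  have hhead : (PySem.List.pyGetD pts 0 (0, 0)).1 = mn := by
    rw [hcons, pyGetD_zero_cons]
    have hmle : ∀ y ∈ S, key m ≤ key y :=
      PySem.List.key_head_sorted_le S key (hpts ▸ hcons)
    have h1 : m.1 ≤ mn := by
      obtain ⟨q, hq, hq1⟩ := hmn_mem
      have := hmle q ((hmemS q).mpr hq)
      rw [Prod.Lex.le_iff] at this
      simp only [ofLex_toLex, hkey] at this
      omega
    have h2 : mn ≤ m.1 := hmn_le m ((hmem m).mp (hcons ▸ List.mem_cons_self))
    omega
  have hlast : (PySem.List.pyGetD pts (-1) (0, 0)).1 = mx := by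
    rw [pyGetD_neg_one pts hne]
    have hlenpos : 0 < pts.length := List.length_pos_iff.mpr hne
    have hlmem : pts.getLast hne ∈ pts := List.getLast_mem hne
    have h2 : (pts.getLast hne).1 ≤ mx := hle_mx _ ((hmem _).mp hlmem)
    have h1 : mx ≤ (pts.getLast hne).1 := by
      obtain ⟨q, hq, hq1⟩ := hmx_mem
      have hqpts : q ∈ pts := (hmem q).mpr hq
      obtain ⟨i, hi, hqi⟩ := List.mem_iff_getElem.mp hqpts
      have hmono := PySem.List.key_sorted_getElem_mono S key
        (p := i) (q := pts.length - 1) (by omega)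
        (by rw [← hpts]; omega)
      have hmono' : key (pts[i]'hi) ≤ key (pts[pts.length - 1]'(by omega)) := hmono
      rw [hqi, Prod.Lex.le_iff] at hmono'
      simp only [hkey, ofLex_toLex] at hmono'
      have hgoal : mx ≤ (pts[pts.length - 1]'(by omega)).1 := by omega
      rw [List.getLast_eq_getElem]
      exact hgoal
    omega
  rw [hhead, hlast]
  -- now compare the two sorted lists
  have hrefl_inj : Function.Injective (fun q : Int × Int => (mn + mx - q.1, q.2)) := by
    intro a b h
    have h1 := congrArg Prod.fst h
    have h2 := congrArg Prod.snd h
    simp only at h1 h2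
    exact Prod.ext (by omega) h2
  rw [beq_iff_eq]
  constructor
  · intro heq q hq
    have hq' : q ∈ pts := (hmem q).mpr hq
    have : (mn + mx - q.1, q.2) ∈ pts.map (fun q => (mn + mx - q.1, q.2)) :=
      List.mem_map_of_mem hq'
    have : (mn + mx - q.1, q.2) ∈ pts := by
      rw [heq]
      exact ((PySem.List.sorted_perm _ key false).mem_iff).mpr this
    have := (hmem _).mp this
    simpa [Int.add_comm mx mn] using this
  · intro hall
    have hsub : pts.map (fun q => (mn + mx - q.1, q.2)) ⊆ pts := by
      intro x hx
      obtain ⟨q, hq, hxq⟩ := List.mem_map.mp hx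
      have := hall q ((hmem q).mp hq)
      rw [show mx + mn = mn + mx from Int.add_comm mx mn] at this
      rw [← hxq] at *
      exact (hmem _).mpr this
    have hndm : (pts.map (fun q => (mn + mx - q.1, q.2))).Nodup := hnd.map hrefl_inj
    have hperm2 : (pts.map (fun q => (mn + mx - q.1, q.2))).Perm pts :=
      (hndm.subperm hsub).perm_of_length_le (by simp)
    rw [PySem.List.sorted_eq_sorted_of_perm _ pts key hkinj hperm2]
    exact (PySem.List.sorted_eq_self_of_pairwise pts key hpw).symm

-- ===== VERDICT (by name: the statement is the Claim_ definition above) =====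
theorem line_reflection_spec : Claim_equal_line_reflection := by
  intro points _
  unfold Spec_line_reflection
  cases points with
  | nil => rfl
  | cons p t =>
    rw [Bool.eq_iff_iff, portA_char, portB_char]
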